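-- pv_equiv track=rewrite | github.com/CorvusVaine/analyzing_connected_papers_articles | zotero_access.py | get_tags_list
-- ===== SOURCE A (Python) =====
-- def get_tags_list(dico) :
--     tag_list = []
--     for k in dico.keys():
--         val = dico[k]
--         for tag in val :
--             if tag not in tag_list:
--                 tag_list.append(tag)
--     return(sorted(tag_list))
-- ===== SOURCE B (Python) =====
-- def get_tags_list(dico):
--     flat = []
--     for val in dico.values():
--         flat.extend(val)
--     out = []
--     for tag in sorted(flat):
--         if not out or out[-1] != tag:
--             out.append(tag)
--     return out
-- ===== Notes on version B (the rewrite author's own statement) =====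
-- stated objective: faster
-- what changed: B flattens all tag lists into one list, sorts it, and collapses equal adjacent runs in a single pass, instead of A's per-tag linear membership scan of the growing result list followed by a final sort.
import Mathlib
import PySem

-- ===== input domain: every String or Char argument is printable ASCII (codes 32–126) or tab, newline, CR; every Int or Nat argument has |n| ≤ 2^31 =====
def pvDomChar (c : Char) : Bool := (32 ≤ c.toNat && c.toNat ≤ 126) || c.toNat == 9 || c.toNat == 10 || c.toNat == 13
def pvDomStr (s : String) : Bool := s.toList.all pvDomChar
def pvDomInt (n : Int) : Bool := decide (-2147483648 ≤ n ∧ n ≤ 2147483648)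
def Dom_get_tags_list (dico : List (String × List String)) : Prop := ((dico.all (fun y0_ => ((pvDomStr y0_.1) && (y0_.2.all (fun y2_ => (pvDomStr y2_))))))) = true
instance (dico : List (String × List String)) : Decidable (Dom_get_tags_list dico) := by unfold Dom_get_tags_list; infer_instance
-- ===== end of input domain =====

-- B flattens all tags into one list, sorts it, and collapses equal adjacent runs in one pass,
-- instead of A's per-tag membership scan of the growing result followed by a final sort.


-- ===== PORT A =====
-- for k in dico.keys(): val = dico[k]; for tag in val: if tag not in tag_list: tag_list.append(tag)
-- (a Python dict has unique keys, so iterating keys and looking each up is iterating the pairs)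
def get_tags_list (dico : List (String × List String)) : List String :=
  let tag_list := dico.foldl (fun tl kv =>
    kv.2.foldl (fun tl tag => if tag ∈ tl then tl else tl ++ [tag]) tl) []
  PySem.List.sorted tag_list (fun x => x) false

-- ===== PORT B =====
-- 'if not out or out[-1] != tag: out.append(tag)'
def pvCollapseStep (out : List String) (tag : String) : List String :=
  if out = [] ∨ PySem.List.pyGet? out (-1) ≠ some tag then out ++ [tag] else out

def get_tags_list_alt (dico : List (String × List String)) : List String :=
  let flat := dico.foldl (fun acc kv => acc ++ kv.2) []
  (PySem.List.sorted flat (fun x => x) false).foldl pvCollapseStep []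

-- ===== PRECONDITION & SPEC =====
def Spec_get_tags_list (dico : List (String × List String)) (out : List String) : Prop := out = get_tags_list_alt dico
instance (dico : List (String × List String)) (out : List String) : Decidable (Spec_get_tags_list dico out) := by unfold Spec_get_tags_list; infer_instance

-- ===== CLAIM (what is proved, stated in full; the proofs are below) =====
def Claim_equal_get_tags_list : Prop := ∀ (dico : List (String × List String)), Dom_get_tags_list dico → Spec_get_tags_list dico (get_tags_list dico)

-- ===== LEMMAS AND PROOFS =====

-- A's inner conditional append is PySem.Set.add
theorem pvAddEq : (fun (tl : List String) tag => if tag ∈ tl then tl else tl ++ [tag]) = PySem.Set.add := by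
  funext tl tag
  by_cases h : tag ∈ tl <;>
    simp only [PySem.Set.add, PySem.Set.contains, h, List.contains_eq_mem, decide_true,
      decide_false, if_true, if_false, Bool.false_eq_true]

theorem pvFoldlFlat {α β : Type} (g : β → List α) (f : List α → α → List α) :
    ∀ (l : List β) (init : List α),
      l.foldl (fun acc b => (g b).foldl f acc) init = (l.flatMap g).foldl f init := by
  intro l
  induction l with
  | nil => intro init; simp
  | cons b t ih => intro init; simp [List.flatMap_cons, List.foldl_append, ih]

-- elements of the collapse fold
theorem pvCollapseMem (x : String) :
    ∀ (s out : List String), x ∈ s.foldl pvCollapseStep out ↔ x ∈ out ∨ x ∈ s := by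
  intro s
  induction s with
  | nil => intro out; simp
  | cons t s ih =>
    intro out
    simp only [List.foldl_cons, pvCollapseStep]
    split_ifs with h
    · rw [ih]; simp [or_assoc]
    · push Not at h
      obtain ⟨hne, hlast⟩ := h
      have ht : t ∈ out := by
        have := PySem.List.pyGet?_neg_one (xs := out)
        rw [this] at hlast
        exact List.mem_of_getLast? hlast
      rw [ih]
      constructor
      · rintro (h | h) <;> simp_all
      · rintro (h | h)
        · exact Or.inl h
        · rcases List.mem_cons.mp h with rfl | h
          · exact Or.inl ht
          · exact Or.inr h

theorem pvLastMax : ∀ (out : List String), out.Pairwise (· < ·) →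
    ∀ a ∈ out, ∀ m, out.getLast? = some m → a ≤ m := by
  intro out
  induction out with
  | nil => simp
  | cons b t ih =>
    intro hp a ha m hm
    rcases List.pairwise_cons.mp hp with ⟨hb, hp'⟩
    cases t with
    | nil =>
      simp at hm ha; subst hm; subst ha; rfl
    | cons c u =>
      rw [List.getLast?_cons_cons] at hm
      rcases List.mem_cons.mp ha with rfl | ha'
      · have hc : c ∈ c :: u := List.mem_cons_self
        exact le_of_lt (lt_of_lt_of_le (hb c hc) (ih hp' c hc m hm))
      · exact ih hp' a ha' m hm

theorem pvCollapseSorted :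
    ∀ (s out : List String), out.Pairwise (· < ·) → s.Pairwise (· ≤ ·) →
      (∀ b ∈ s, ∀ m, out.getLast? = some m → m ≤ b) →
      (s.foldl pvCollapseStep out).Pairwise (· < ·) := by
  intro s
  induction s with
  | nil => intro out h _ _; simpa using h
  | cons t s ih =>
    intro out hout hs hlast
    rcases List.pairwise_cons.mp hs with ⟨hts, hs'⟩
    simp only [List.foldl_cons, pvCollapseStep]
    split_ifs with h
    · apply ih
      · rw [List.pairwise_append]
        refine ⟨hout, by simp, ?_⟩
        intro a ha b hb
        simp at hb; subst hb
        rcases h with h | h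
        · subst h; simp at ha
        · rw [PySem.List.pyGet?_neg_one] at h
          cases hout' : out.getLast? with
          | none => rw [List.getLast?_eq_none_iff] at hout'; subst hout'; simp at ha
          | some m =>
            have hm : m ≤ b := hlast b List.mem_cons_self m hout'
            have hmt : m ≠ b := by rw [hout'] at h; simpa using h
            exact lt_of_le_of_lt (pvLastMax out hout a ha m hout') (lt_of_le_of_ne hm hmt)
      · exact hs'
      · intro b hb m hm
        rw [List.getLast?_append, List.getLast?_singleton] at hm
        simp at hm; subst hm
        exact hts b hb
    · push Not at h
      obtain ⟨hne, hlastT⟩ := h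
      rw [PySem.List.pyGet?_neg_one] at hlastT
      refine ih _ hout hs' ?_
      intro b hb m hm
      rw [hm] at hlastT
      have : m = t := by simpa using hlastT
      subst this
      exact hts b hb

-- ===== VERDICT (by name: the statement is the Claim_ definition above) =====
theorem get_tags_list_spec : Claim_equal_get_tags_list := by
  intro dico _
  unfold Spec_get_tags_list get_tags_list get_tags_list_alt
  set flat := dico.flatMap Prod.snd with hflat
  have hB : dico.foldl (fun acc kv => acc ++ kv.2) [] = flat := by
    rw [PySem.List.foldl_append_eq_flatMap]; simp [hflat]
  have hA : dico.foldl (fun tl kv =>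
      kv.2.foldl (fun tl tag => if tag ∈ tl then tl else tl ++ [tag]) tl) []
      = PySem.Set.ofList flat := by
    rw [pvAddEq, pvFoldlFlat, PySem.Set.ofList_eq_foldl]
  rw [hA, hB]
  set s := PySem.List.sorted flat (fun x => x) false with hs
  set ys := s.foldl pvCollapseStep [] with hys
  have hpw : ys.Pairwise (· < ·) := by
    apply pvCollapseSorted
    · simp
    · simpa using PySem.List.sorted_pairwise (xs := flat) (key := fun x => x)
    · intro b _ m hm; simp at hm
  have hperm : ys.Perm (PySem.Set.ofList flat) := by
    rw [List.perm_ext_iff_of_nodup (hpw.imp ne_of_lt) (PySem.Set.nodup_ofList flat)]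
    intro a
    rw [PySem.Set.mem_ofList, pvCollapseMem]
    simp [hs, PySem.List.mem_sorted]
  show PySem.List.sorted (PySem.Set.ofList flat) (fun x => x) false = ys
  exact PySem.List.sorted_eq_of_perm_of_pairwise_lt _ _ (fun x => x) hperm hpw
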